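-- pv_equiv track=rewrite | github.com/Gaius-Augustus/Tiberius | bin/eval_model_class.py | get_tx_from_range
-- ===== SOURCE A (Python) =====
-- def get_tx_from_range(range_):
--     """
--     Extracts transcript regions from a given tuples of class ranges. It extracts for each transcript
--     the regions of their CDS. Additionally, it reports fragmented txs add the start or end of the
--     input ranges.
--
--     Parameters:
--     - range_ (list of tuples/lists): A sequence of regions, where each region is represented as a tuple or list.
--                                      The first element of each tuple/list indicates the type of the region ('intergenic'
--                                      or otherwise), and the subsequent elements provide additional details about the region.
--
--     Returns:
--     - initial_tx (list): List of exon ranges of the first fragmented transcript.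
--     - txs (list of lists): List of transcripts with their CDS ranges.
--     - current_tx (list): Last fragmented Transcript
--     """
--
--     txs = []
--     current_tx = []
--     initial_tx = []
--
--     for region in range_:
--         if region[0] == 'intergenic':
--             if current_tx:
--                 txs.append(current_tx)
--                 current_tx = []
--         else:
--             current_tx.append(region)
--     if range_[0][0] != 'intergenic' and txs:
--         initial_tx = txs[0]
--         txs = txs[1:]
--     return initial_tx, txs, current_tx
-- ===== SOURCE B (Python) =====
-- def get_tx_from_range(range_):
--     # Cut-index approach: record the positions of the intergenic markers, then
--     # recover each transcript as the slice of range_ between consecutive cuts.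
--     cuts = [i for i, r in enumerate(range_) if r[0] == 'intergenic']
--     bounds = [-1] + cuts + [len(range_)]
--     segs = [range_[a + 1:b] for a, b in zip(bounds, bounds[1:])]
--     segs = [s for s in segs if s]
--     current_tx = segs.pop() if range_[-1][0] != 'intergenic' else []
--     initial_tx = segs.pop(0) if range_[0][0] != 'intergenic' and segs else []
--     return initial_tx, segs, current_tx
-- ===== Notes on version B (the rewrite author's own statement) =====
-- stated objective: alternative
-- what changed: Replaces A's accumulating state machine (current_tx/txs built region by region) by index arithmetic: first collect the positions of the intergenic markers, then materialize each transcript as the slice of range_ between consecutive cut positions, then classify the two end slices.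
import Mathlib
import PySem

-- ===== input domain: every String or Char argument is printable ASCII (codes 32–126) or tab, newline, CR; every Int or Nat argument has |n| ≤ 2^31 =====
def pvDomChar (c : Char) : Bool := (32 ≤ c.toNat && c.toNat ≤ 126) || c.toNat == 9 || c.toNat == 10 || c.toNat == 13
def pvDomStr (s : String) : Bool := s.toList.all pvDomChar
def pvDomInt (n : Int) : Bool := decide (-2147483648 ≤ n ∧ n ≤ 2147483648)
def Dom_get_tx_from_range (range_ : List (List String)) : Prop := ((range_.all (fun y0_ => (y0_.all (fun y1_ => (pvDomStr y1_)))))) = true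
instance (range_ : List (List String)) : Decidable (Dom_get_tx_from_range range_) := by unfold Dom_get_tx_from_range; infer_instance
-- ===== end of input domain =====

-- B replaces A's accumulating state machine by index arithmetic: collect the intergenic
-- cut positions, slice range_ between consecutive cuts, classify the end slices (alternative).

-- ===== PORT A =====
-- A: one pass with mutable state (txs, current_tx), then a fix-up for the first transcript.
def get_tx_from_range (range_ : List (List String)) :
    List (List String) × List (List (List String)) × List (List String) :=
  let st := range_.foldl
    (fun (st : List (List (List String)) × List (List String)) region =>
      if ((PySem.List.pyGet? region 0).getD "") == "intergenic" then
        if !st.2.isEmpty then (st.1 ++ [st.2], []) else st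
      else (st.1, st.2 ++ [region])) ([], [])
  let txs := st.1
  let current_tx := st.2
  if (((PySem.List.pyGet? ((PySem.List.pyGet? range_ 0).getD []) 0).getD "") != "intergenic")
      && !txs.isEmpty then
    ((PySem.List.pyGet? txs 0).getD [], PySem.List.slice txs (some 1) none, current_tx)
  else ([], txs, current_tx)

-- ===== PORT B =====
-- region[0] == 'intergenic' (the comprehension filter of Source B)
def pvIsInt (r : List String) : Bool := ((PySem.List.pyGet? r 0).getD "") == "intergenic"

-- cuts = [i for i, r in enumerate(range_) if r[0] == 'intergenic']
def cutsB (xs : List (List String)) : List Int :=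
  ((PySem.List.enumerate xs 0).filter (fun p => pvIsInt p.2)).map (fun p => p.1)

-- bounds = [-1] + cuts + [len(range_)]
def boundsB (xs : List (List String)) : List Int :=
  -1 :: (cutsB xs ++ [(xs.length : Int)])

-- [range_[a+1:b] for a, b in zip(bounds, bounds[1:])]
def mkSegs (xs : List (List String)) (bs : List Int) : List (List (List String)) :=
  (bs.zip bs.tail).map (fun p => PySem.List.slice xs (some (p.1 + 1)) (some p.2))

def segsB (xs : List (List String)) : List (List (List String)) :=
  mkSegs xs (boundsB xs)

def get_tx_from_range_alt (range_ : List (List String)) :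
    List (List String) × List (List (List String)) × List (List String) :=
  let first_nonint :=
    ((PySem.List.pyGet? ((PySem.List.pyGet? range_ 0).getD []) 0).getD "") != "intergenic"
  let segs := (segsB range_).filter (fun s => !s.isEmpty)   -- segs = [s for s in segs if s]
  let p1 :=
    if !pvIsInt ((PySem.List.pyGet? range_ (-1)).getD []) then
      (segs.dropLast, segs.getLastD [])                     -- segs.pop()
    else (segs, ([] : List (List String)))
  let p2 :=
    if first_nonint && !p1.1.isEmpty then (p1.1.tail, p1.1.headD [])   -- segs.pop(0)
    else (p1.1, ([] : List (List String)))
  (p2.2, p2.1, p1.2)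

-- ===== PRECONDITION & SPEC =====
-- Pre_ excludes exactly the inputs where A raises IndexError: the empty list
-- (range_[0] fails) and lists containing an empty region (region[0] fails).
def Pre_get_tx_from_range (range_ : List (List String)) : Prop :=
  range_ ≠ [] ∧ range_.all (fun r => !r.isEmpty) = true
instance (range_ : List (List String)) : Decidable (Pre_get_tx_from_range range_) := by
  unfold Pre_get_tx_from_range; infer_instance

def pvWitness_get_tx_from_range : List (List String) :=
  [["CDS", "1", "10"], ["intergenic"], ["CDS", "20", "30"]]

def Spec_get_tx_from_range (range_ : List (List String)) (out : List (List String) × List (List (List String)) × List (List String)) : Prop := out = get_tx_from_range_alt range_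
instance (range_ : List (List String)) (out : List (List String) × List (List (List String)) × List (List String)) : Decidable (Spec_get_tx_from_range range_ out) := by unfold Spec_get_tx_from_range; infer_instance

-- ===== CLAIM (what is proved, stated in full; the proofs are below) =====
def Claim_equal_get_tx_from_range : Prop := ∀ (range_ : List (List String)), Dom_get_tx_from_range range_ → Pre_get_tx_from_range range_ → Spec_get_tx_from_range range_ (get_tx_from_range range_)

-- ===== LEMMAS AND PROOFS =====

-- A's loop body, rewritten as recursion: fc = completed transcripts, gc = open transcript.
def fc : List (List String) → List (List String) → List (List (List String))
  | _, [] => []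
  | cur, r :: rs =>
    if pvIsInt r then (if !cur.isEmpty then cur :: fc [] rs else fc [] rs)
    else fc (cur ++ [r]) rs

def gc : List (List String) → List (List String) → List (List String)
  | cur, [] => cur
  | cur, r :: rs => if pvIsInt r then gc [] rs else gc (cur ++ [r]) rs

-- the maximal non-intergenic runs, as a proof-side characterisation shared by both ports
def pvGroups : List (List String) → List (List (List String))
  | [] => []
  | r :: rs =>
    if pvIsInt r then pvGroups rs
    else
      ((r :: rs).takeWhile (fun x => !pvIsInt x)) ::
        pvGroups ((r :: rs).dropWhile (fun x => !pvIsInt x))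
termination_by xs => xs.length
decreasing_by
  all_goals simp_all
  all_goals (have := List.length_dropWhile_le (fun x => !pvIsInt x) rs; omega)

theorem foldA (xs : List (List String)) : ∀ txs cur,
    xs.foldl
      (fun (st : List (List (List String)) × List (List String)) region =>
        if ((PySem.List.pyGet? region 0).getD "") == "intergenic" then
          if !st.2.isEmpty then (st.1 ++ [st.2], []) else st
        else (st.1, st.2 ++ [region])) (txs, cur)
      = (txs ++ fc cur xs, gc cur xs) := by
  induction xs with
  | nil => intro txs cur; simp [fc, gc]
  | cons r rs ih =>
    intro txs cur
    rw [List.foldl_cons]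
    by_cases h : ((PySem.List.pyGet? r 0).getD "" == "intergenic") = true
    · by_cases hc : cur = []
      · subst hc
        simp only [h, List.isEmpty_nil, Bool.not_true, if_true, Bool.false_eq_true, if_false, ih]
        simp [fc, gc, pvIsInt, h]
      · have hce : cur.isEmpty = false := by simpa using hc
        simp only [h, hce, Bool.not_false, if_true, ih]
        simp [fc, gc, pvIsInt, h, hc]
    · have hb : ((PySem.List.pyGet? r 0).getD "" == "intergenic") = false := by
        simpa using h
      simp only [hb, Bool.false_eq_true, if_false, ih]
      simp [fc, gc, pvIsInt, hb]

theorem span_fc_gc (xs : List (List String)) : ∀ cur : List (List String), cur ≠ [] →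
    (fc cur xs = (match xs.dropWhile (fun x => !pvIsInt x) with
        | [] => []
        | _ :: d' => (cur ++ xs.takeWhile (fun x => !pvIsInt x)) :: fc [] d')
    ∧ gc cur xs = (match xs.dropWhile (fun x => !pvIsInt x) with
        | [] => cur ++ xs.takeWhile (fun x => !pvIsInt x)
        | _ :: d' => gc [] d')) := by
  induction xs with
  | nil => intro cur _; simp [fc, gc]
  | cons r rs ih =>
    intro cur hcur
    by_cases h : pvIsInt r
    · have hne : cur.isEmpty = false := by simp [hcur]
      simp [fc, gc, h, hne]
    · have h1 := ih (cur ++ [r]) (by simp)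
      rcases hd : rs.dropWhile (fun x => !pvIsInt x) with _ | ⟨d, d'⟩ <;>
      · rw [hd] at h1
        simp [fc, gc, h, hd, h1.1, h1.2]

theorem main_groups (xs : List (List String)) :
    fc [] xs ++ (if gc [] xs = [] then [] else [gc [] xs]) = pvGroups xs := by
  induction xs using pvGroups.induct with
  | case1 => simp [fc, gc, pvGroups]
  | case2 r rs h ih => simp [fc, gc, pvGroups, h, ih]
  | case3 r rs h ih =>
    have hpr : pvIsInt r = false := by simpa using h
    have hs := span_fc_gc rs [r] (by simp)
    have hfc : fc [] (r :: rs) = fc [r] rs := by simp [fc, hpr]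
    have hgc : gc [] (r :: rs) = gc [r] rs := by simp [gc, hpr]
    rw [pvGroups]
    simp only [hpr, Bool.false_eq_true, if_false, List.takeWhile_cons, List.dropWhile_cons,
      Bool.not_false]
    rw [hfc, hgc, hs.1, hs.2]
    simp only [List.dropWhile_cons, hpr, Bool.not_false, if_true] at ih
    rcases hd : rs.dropWhile (fun x => !pvIsInt x) with _ | ⟨d, d'⟩
    · simp [pvGroups]
    · rw [hd] at ih
      have hdInt : pvIsInt d = true := by
        have := List.head?_dropWhile_not (fun x => !pvIsInt x) rs
        rw [hd] at this; simpa using this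
      have hPG : pvGroups (d :: d') = pvGroups d' := by rw [pvGroups]; simp [hdInt]
      have hfc' : fc [] (d :: d') = fc [] d' := by simp [fc, hdInt]
      have hgc' : gc [] (d :: d') = gc [] d' := by simp [gc, hdInt]
      rw [hfc', hgc', hPG] at ih
      simp [ih, hPG]

theorem gc_last (xs : List (List String)) : ∀ cur, xs ≠ [] →
    (gc cur xs = [] ↔ pvIsInt (xs.getLastD []) = true) := by
  induction xs with
  | nil => simp
  | cons r rs ih =>
    intro cur _
    rcases rs with _ | ⟨s, rs'⟩
    · by_cases h : pvIsInt r <;> simp [gc, h]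
    · have h1 := ih (if pvIsInt r then [] else cur ++ [r]) (by simp)
      by_cases h : pvIsInt r <;> simp [gc, h] at h1 ⊢ <;> exact h1

-- ===== B-side lemmas: the cut/slice construction also computes pvGroups =====

theorem cuts_shift (rs : List (List String)) : ∀ s : Int,
    ((PySem.List.enumerate rs s).filter (fun p => pvIsInt p.2)).map (fun p => p.1)
      = (((PySem.List.enumerate rs 0).filter (fun p => pvIsInt p.2)).map (fun p => p.1)).map
          (fun x => x + s) := by
  induction rs with
  | nil => intro s; simp [PySem.List.enumerate]
  | cons x xs ih =>
    intro s
    rw [PySem.List.enumerate_cons, PySem.List.enumerate_cons, zero_add]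
    by_cases h : pvIsInt x
    · simp only [List.filter_cons, h, if_true, List.map_cons, ih (s+1), ih 1, List.map_map,
        zero_add]
      congr 1
      apply List.map_congr_left; intro y _; simp only [Function.comp_apply]; omega
    · simp only [List.filter_cons, h, Bool.false_eq_true, if_false, ih (s+1), ih 1, List.map_map]
      apply List.map_congr_left; intro y _; simp only [Function.comp_apply]; omega

theorem cutsB_cons (r : List String) (rs : List (List String)) :
    cutsB (r :: rs) = (if pvIsInt r then [(0 : Int)] else []) ++ (cutsB rs).map (fun x => x + 1) := by
  unfold cutsB
  rw [PySem.List.enumerate_cons, zero_add]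
  by_cases h : pvIsInt r <;>
    simp [h, cuts_shift rs 1]

theorem cutsB_nonneg (xs : List (List String)) : ∀ c ∈ cutsB xs, 0 ≤ c := by
  intro c hc
  unfold cutsB at hc
  simp only [List.mem_map, List.mem_filter] at hc
  obtain ⟨p, ⟨hp, _⟩, rfl⟩ := hc
  rw [PySem.List.mem_enumerate_iff] at hp
  obtain ⟨k, hk, rfl⟩ := hp
  simp

theorem mkSegs_cons (xs : List (List String)) (a b : Int) (bs : List Int) :
    mkSegs xs (a :: b :: bs)
      = PySem.List.slice xs (some (a + 1)) (some b) :: mkSegs xs (b :: bs) := by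
  simp [mkSegs]

theorem slice_shift (r : List String) (rs : List (List String)) (a b : Int)
    (ha : 0 ≤ a) (hb : 0 ≤ b) :
    PySem.List.slice (r :: rs) (some (a + 1)) (some (b + 1))
      = PySem.List.slice rs (some a) (some b) := by
  rw [PySem.List.slice_toNat _ (by omega) (by omega),
      PySem.List.slice_toNat _ ha hb]
  have h2 : (b + 1).toNat - (a + 1).toNat = b.toNat - a.toNat := by omega
  rw [h2] at *
  have h1 : (a + 1).toNat = a.toNat + 1 := by omega
  rw [h1, List.drop_succ_cons]

theorem slice_zero_cons (r : List String) (rs : List (List String)) (b : Int) (hb : 0 ≤ b) :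
    PySem.List.slice (r :: rs) (some 0) (some (b + 1))
      = r :: PySem.List.slice rs (some 0) (some b) := by
  rw [PySem.List.slice_toNat _ (by omega) (by omega),
      PySem.List.slice_toNat _ (by omega) hb]
  have h1 : (b + 1).toNat = b.toNat + 1 := by omega
  simp [h1]

theorem mkSegs_shift (r : List String) (rs : List (List String)) : ∀ bs : List Int,
    (∀ x ∈ bs, -1 ≤ x) → (∀ x ∈ bs.tail, 0 ≤ x) →
    mkSegs (r :: rs) (bs.map (fun x => x + 1)) = mkSegs rs bs := by
  intro bs
  induction bs with
  | nil => intro _ _; simp [mkSegs]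
  | cons a bs ih =>
    intro hall htail
    rcases bs with _ | ⟨b, bs'⟩
    · simp [mkSegs]
    · rw [List.map_cons, List.map_cons, mkSegs_cons, mkSegs_cons]
      have hb : (0:Int) ≤ b := htail b (by simp)
      have ha : (-1:Int) ≤ a := hall a (by simp)
      rw [show a + 1 + 1 = (a + 1) + 1 by ring]
      rw [slice_shift r rs (a+1) b (by omega) hb]
      congr 1
      exact ih (fun x hx => hall x (List.mem_cons_of_mem _ hx))
        (fun x hx => htail x (List.mem_cons_of_mem _ hx))

theorem cutsB_nil : cutsB [] = [] := by simp [cutsB, PySem.List.enumerate]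

theorem slice_zero_zero (xs : List (List String)) :
    PySem.List.slice xs (some 0) (some 0) = [] := by
  rw [PySem.List.slice_toNat _ (by omega) (by omega)]; simp

theorem segsB_cons_int (r : List String) (rs : List (List String)) (h : pvIsInt r = true) :
    segsB (r :: rs) = [] :: segsB rs := by
  unfold segsB boundsB
  rw [cutsB_cons]
  simp only [h, if_true, List.singleton_append]
  have hlen : (((r :: rs).length : Nat) : Int) = (rs.length : Int) + 1 := by push_cast [List.length_cons]; ring
  rw [hlen]
  have hmap : (cutsB rs).map (fun x => x + 1) ++ [(rs.length : Int) + 1]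
      = ((cutsB rs) ++ [(rs.length : Int)]).map (fun x => x + 1) := by simp
  have hcons : (0 : Int) :: ((cutsB rs) ++ [(rs.length : Int)]).map (fun x => x + 1)
      = ((-1 : Int) :: ((cutsB rs) ++ [(rs.length : Int)])).map (fun x => x + 1) := by simp
  simp only [List.cons_append]
  rw [mkSegs_cons]
  rw [show ((-1 : Int) + 1) = (0 : Int) by ring, slice_zero_zero]
  congr 1
  rw [hmap, hcons, mkSegs_shift r rs]
  · intro x hx
    rcases List.mem_cons.1 hx with rfl | hx'
    · omega
    · rcases List.mem_append.1 hx' with hx'' | hx''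
      · have := cutsB_nonneg rs x hx''; omega
      · simp at hx''; omega
  · intro x hx
    simp only [List.tail_cons] at hx
    rcases List.mem_append.1 hx with hx'' | hx''
    · exact cutsB_nonneg rs x hx''
    · simp at hx''; omega

theorem segsB_cons_nonint (r : List String) (rs : List (List String)) (h : pvIsInt r = false)
    (h0 : Int) (rtl : List Int) (hr : cutsB rs ++ [(rs.length : Int)] = h0 :: rtl) :
    segsB (r :: rs) = (r :: PySem.List.slice rs (some 0) (some h0)) :: mkSegs rs (h0 :: rtl)
      ∧ segsB rs = PySem.List.slice rs (some 0) (some h0) :: mkSegs rs (h0 :: rtl) := by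
  have hh0 : 0 ≤ h0 := by
    have : h0 ∈ cutsB rs ++ [(rs.length : Int)] := by rw [hr]; simp
    rcases List.mem_append.1 this with hx | hx
    · exact cutsB_nonneg rs h0 hx
    · simp at hx; omega
  have hrtl : ∀ x ∈ rtl, 0 ≤ x := by
    intro x hx
    have : x ∈ cutsB rs ++ [(rs.length : Int)] := by rw [hr]; simp [hx]
    rcases List.mem_append.1 this with hx' | hx'
    · exact cutsB_nonneg rs x hx'
    · simp at hx'; omega
  constructor
  · unfold segsB boundsB
    rw [cutsB_cons]
    simp only [h, Bool.false_eq_true, if_false, List.nil_append]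
    have hlen : (((r :: rs).length : Nat) : Int) = (rs.length : Int) + 1 := by
      push_cast [List.length_cons]; ring
    rw [hlen]
    have hmap : (cutsB rs).map (fun x => x + 1) ++ [(rs.length : Int) + 1]
        = ((cutsB rs) ++ [(rs.length : Int)]).map (fun x => x + 1) := by simp
    rw [hmap, hr, List.map_cons, mkSegs_cons]
    rw [show ((-1 : Int) + 1) = (0 : Int) by ring]
    rw [slice_zero_cons r rs h0 hh0]
    congr 1
    rw [show ((h0 + 1) :: rtl.map (fun x => x + 1)) = (h0 :: rtl).map (fun x => x + 1) from rfl]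
    exact mkSegs_shift r rs (h0 :: rtl)
      (fun x hx => by rcases List.mem_cons.1 hx with rfl | hx' <;> [omega; exact le_trans (by omega) (hrtl x hx')])
      (fun x hx => hrtl x (by simpa using hx))
  · unfold segsB boundsB
    rw [hr, mkSegs_cons, show ((-1 : Int) + 1) = (0 : Int) by ring]

theorem segsFil_eq (xs : List (List String)) :
    (segsB xs).filter (fun s => !s.isEmpty) = pvGroups xs := by
  induction xs with
  | nil =>
    rw [pvGroups]
    unfold segsB boundsB
    rw [cutsB_nil]
    simp only [List.nil_append, List.length_nil, Nat.cast_zero]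
    rw [show ((-1 : Int) :: [(0 : Int)]) = (-1) :: (0 : Int) :: [] from rfl, mkSegs_cons]
    rw [show ((-1 : Int) + 1) = (0 : Int) by ring, slice_zero_zero]
    simp [mkSegs]
  | cons r rs ih =>
    by_cases h : pvIsInt r
    · rw [segsB_cons_int r rs h, pvGroups]
      simp only [h, if_true]
      simpa using ih
    · rcases hr : cutsB rs ++ [(rs.length : Int)] with _ | ⟨h0, rtl⟩
      · exact absurd hr (by simp)
      obtain ⟨e1, e2⟩ := segsB_cons_nonint r rs (by simpa using h) h0 rtl hr
      rw [e1]
      rcases rs with _ | ⟨s, rs'⟩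
      · -- rs = []
        rw [cutsB_nil] at hr
        simp only [List.nil_append, List.length_nil, Nat.cast_zero] at hr
        obtain ⟨rfl, rfl⟩ : h0 = 0 ∧ rtl = [] := by
          have := List.cons.inj hr
          exact ⟨this.1.symm, this.2.symm⟩
        rw [slice_zero_zero]
        rw [pvGroups]
        simp [h, pvGroups, mkSegs]
      · by_cases hs : pvIsInt s
        · have hc : cutsB (s :: rs') = (0 : Int) :: (cutsB rs').map (fun x => x + 1) := by
            rw [cutsB_cons]; simp [hs]
          rw [hc, List.cons_append] at hr
          injection hr with hr1 hr2
          subst hr1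
          rw [slice_zero_zero] at e1 e2 ⊢
          rw [e2] at ih
          have hfil : (([] :: mkSegs (s :: rs') (0 :: rtl)).filter (fun s => !s.isEmpty))
              = (mkSegs (s :: rs') (0 :: rtl)).filter (fun s => !s.isEmpty) := by simp
          rw [hfil] at ih
          rw [pvGroups]
          simp only [h, Bool.false_eq_true, if_false]
          have htw : (r :: s :: rs').takeWhile (fun x => !pvIsInt x) = [r] := by
            simp [h, hs]
          have hdw : (r :: s :: rs').dropWhile (fun x => !pvIsInt x) = s :: rs' := by
            simp [h, hs]
          rw [htw, hdw]
          have hpg : pvGroups (s :: rs') = pvGroups ((s :: rs')) := rfl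
          rw [← ih]
          simp
        · -- s not intergenic: head segment of rs is nonempty
          have hh1 : 1 ≤ h0 := by
            have hmem : h0 ∈ cutsB (s :: rs') ++ [((s :: rs').length : Int)] := by
              rw [hr]; simp
            have hc : cutsB (s :: rs') = (cutsB rs').map (fun x => x + 1) := by
              rw [cutsB_cons]; simp [hs]
            rcases List.mem_append.1 hmem with hx | hx
            · rw [hc] at hx
              obtain ⟨c, hcm, rfl⟩ := List.mem_map.1 hx
              have := cutsB_nonneg rs' c hcm; omega
            · simp at hx; omega
          have hslice : PySem.List.slice (s :: rs') (some 0) (some h0)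
              = s :: PySem.List.slice rs' (some 0) (some (h0 - 1)) := by
            have := slice_zero_cons s rs' (h0 - 1) (by omega)
            rwa [show (h0 - 1 + 1) = h0 by ring] at this
          rw [hslice] at e1 e2 ⊢
          rw [e2] at ih
          have hfil : ((s :: PySem.List.slice rs' (some 0) (some (h0 - 1))) :: mkSegs (s :: rs') (h0 :: rtl)).filter (fun x => !x.isEmpty)
              = (s :: PySem.List.slice rs' (some 0) (some (h0 - 1))) :: (mkSegs (s :: rs') (h0 :: rtl)).filter (fun x => !x.isEmpty) := by
            simp
          rw [hfil] at ih
          have hpg : pvGroups (s :: rs') = ((s :: rs').takeWhile (fun x => !pvIsInt x)) ::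
              pvGroups ((s :: rs').dropWhile (fun x => !pvIsInt x)) := by
            rw [pvGroups]; simp [hs]
          rw [hpg] at ih
          have ih1 := (List.cons.inj ih).1
          have ih2 := (List.cons.inj ih).2
          rw [pvGroups]
          simp only [h, Bool.false_eq_true, if_false]
          have htw : (r :: s :: rs').takeWhile (fun x => !pvIsInt x)
              = r :: (s :: rs').takeWhile (fun x => !pvIsInt x) := by
            simp [List.takeWhile_cons, h]
          have hdw : (r :: s :: rs').dropWhile (fun x => !pvIsInt x)
              = (s :: rs').dropWhile (fun x => !pvIsInt x) := by
            simp [List.dropWhile_cons, h]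
          rw [htw, hdw, ← ih1, ← ih2]
          simp

-- ===== VERDICT (by name: the statement is the Claim_ definition above) =====
theorem get_tx_from_range_spec : Claim_equal_get_tx_from_range := by
  intro range_ _ hpre
  rcases hpre with ⟨hne, _⟩
  unfold Spec_get_tx_from_range get_tx_from_range get_tx_from_range_alt
  rw [foldA]
  simp only [List.nil_append, segsFil_eq]
  have hmain := main_groups range_
  by_cases hlast : pvIsInt (range_.getLastD []) = true
  · -- last region intergenic: no open transcript
    have hgc : gc [] range_ = [] := (gc_last range_ [] hne).2 hlast
    rw [hgc] at hmain; simp at hmain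
    have hget : (PySem.List.pyGet? range_ (-1)).getD [] = range_.getLastD [] := by
      rw [PySem.List.pyGet?_neg_one, List.getLastD_eq_getLast?]
    have hlastB : pvIsInt ((PySem.List.pyGet? range_ (-1)).getD []) = true := by
      rw [hget]; exact hlast
    simp only [hlastB, Bool.not_true, Bool.false_eq_true, if_false, hgc, ← hmain]
    rcases hfc : fc [] range_ with _ | ⟨g, gs⟩
    · simp
    · simp only [PySem.List.slice_from_one, PySem.List.pyGet?_zero_cons]
      split_ifs <;> simp
  · -- last region not intergenic: open transcript = last group
    have hgc : gc [] range_ ≠ [] := by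
      intro h; exact hlast ((gc_last range_ [] hne).1 h)
    rw [if_neg hgc] at hmain
    have hget : (PySem.List.pyGet? range_ (-1)).getD [] = range_.getLastD [] := by
      rw [PySem.List.pyGet?_neg_one, List.getLastD_eq_getLast?]
    have hlast' : pvIsInt ((PySem.List.pyGet? range_ (-1)).getD []) = false := by
      rw [hget]; simpa using hlast
    simp only [hlast', Bool.not_false, if_true, ← hmain]
    rw [List.dropLast_concat, List.getLastD_concat]
    rcases hfc : fc [] range_ with _ | ⟨g, gs⟩
    · simp
    · simp only [PySem.List.slice_from_one, PySem.List.pyGet?_zero_cons]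
      split_ifs <;> simp
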